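-- pv_equiv track=rewrite | github.com/ZhanGaoCN/scientific_reserch_project | reli_nack_generator/tb/test_reli_nack_generator/test_reli_nack_generator_top_interconnect.py | generate_light_order_list
-- ===== SOURCE A (Python) =====
-- def generate_light_order_list(sort_number):
--     b = []
--     for i in range(1, sort_number):
--         if i % 2 == 0:
--             b.append(i - 1)
--         else:
--             b.append(i + 1)
--     return b
-- ===== SOURCE B (Python) =====
-- def generate_light_order_list(sort_number):
--     b = []
--     for i in range(1, sort_number, 2):
--         b.append(i + 1)
--         if i + 1 < sort_number:
--             b.append(i)
--     return b
-- ===== Notes on version B (the rewrite author's own statement) =====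
-- stated objective: alternative
-- what changed: Iterates over odd indices only with a stride-2 range, emitting each swapped pair (i+1, i) at once with a single boundary check, instead of visiting every index and branching on its parity.
import Mathlib
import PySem

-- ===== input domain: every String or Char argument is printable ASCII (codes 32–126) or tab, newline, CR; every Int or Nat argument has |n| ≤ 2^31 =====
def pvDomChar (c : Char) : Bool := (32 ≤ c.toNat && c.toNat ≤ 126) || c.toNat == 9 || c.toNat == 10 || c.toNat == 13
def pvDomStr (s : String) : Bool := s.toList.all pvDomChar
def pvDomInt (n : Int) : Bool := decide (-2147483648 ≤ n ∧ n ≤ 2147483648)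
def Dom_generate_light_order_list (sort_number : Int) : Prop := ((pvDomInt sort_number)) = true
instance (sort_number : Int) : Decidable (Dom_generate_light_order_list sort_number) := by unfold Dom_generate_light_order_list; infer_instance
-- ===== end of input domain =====

-- B iterates over odd indices only (stride-2 range), emitting each swapped pair (i+1, i)
-- at once with a single boundary check, instead of branching on every index's parity.


-- ===== PORT A =====
def generate_light_order_list (sort_number : Int) : List Int :=
  (PySem.List.pyRange 1 sort_number 1).foldl
    (fun b i => if PySem.Int.mod i 2 = 0 then b ++ [i - 1] else b ++ [i + 1]) []

-- ===== PORT B =====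
def generate_light_order_list_alt (sort_number : Int) : List Int :=
  (PySem.List.pyRange 1 sort_number 2).foldl
    (fun b i =>
      let b2 := b ++ [i + 1]
      if i + 1 < sort_number then b2 ++ [i] else b2) []

-- ===== PRECONDITION & SPEC =====
def Spec_generate_light_order_list (sort_number : Int) (out : List Int) : Prop := out = generate_light_order_list_alt sort_number
instance (sort_number : Int) (out : List Int) : Decidable (Spec_generate_light_order_list sort_number out) := by unfold Spec_generate_light_order_list; infer_instance

-- ===== CLAIM (what is proved, stated in full; the proofs are below) =====
def Claim_equal_generate_light_order_list : Prop := ∀ (sort_number : Int), Dom_generate_light_order_list sort_number → Spec_generate_light_order_list sort_number (generate_light_order_list sort_number)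

-- ===== LEMMAS AND PROOFS =====

theorem mod2 (a : Int) : PySem.Int.mod a 2 = a % 2 := by
  simp [PySem.Int.mod, Int.fmod_eq_emod]

theorem pyRange_two_nil {a b : Int} (h : b ≤ a) : PySem.List.pyRange a b 2 = [] := by
  rw [PySem.List.pyRange_of_pos a b (by norm_num)]
  simp [show ¬ a < b by omega]

theorem pyRange_two_cons {a b : Int} (h : a < b) :
    PySem.List.pyRange a b 2 = a :: PySem.List.pyRange (a + 2) b 2 := by
  rw [PySem.List.pyRange_of_pos a b (by norm_num),
      PySem.List.pyRange_of_pos (a + 2) b (by norm_num)]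
  by_cases h2 : a + 2 < b
  · rw [if_pos h, if_pos h2]
    have hc : ((b - a + 2 - 1) / 2).toNat = ((b - (a + 2) + 2 - 1) / 2).toNat + 1 := by omega
    rw [hc, List.range_succ_eq_map]
    simp only [List.map_cons, List.map_map]
    congr 1
    · simp
    · apply List.map_congr_left
      intro k _
      simp [Function.comp]
      ring
  · rw [if_pos h, if_neg h2]
    have hc : ((b - a + 2 - 1) / 2).toNat = 1 := by omega
    rw [hc]
    simp

theorem main_lemma (n : Int) : ∀ (k : Nat) (a : Int) (acc : List Int),
    (n - a).toNat = k → a % 2 = 1 →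
    (PySem.List.pyRange a n 1).foldl
      (fun b i => if PySem.Int.mod i 2 = 0 then b ++ [i - 1] else b ++ [i + 1]) acc =
    (PySem.List.pyRange a n 2).foldl
      (fun b i => if i + 1 < n then b ++ [i + 1] ++ [i] else b ++ [i + 1]) acc := by
  intro k
  induction k using Nat.strong_induction_on with
  | _ k ih =>
    intro a acc hk hodd
    by_cases h : a < n
    · rw [PySem.List.pyRange_one_cons h, pyRange_two_cons h]
      simp only [List.foldl_cons]
      rw [if_neg (by rw [mod2]; omega)]
      by_cases h1 : a + 1 < n
      · rw [PySem.List.pyRange_one_cons h1, if_pos h1]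
        simp only [List.foldl_cons]
        rw [if_pos (by rw [mod2]; omega),
            show a + 1 - 1 = a from by ring, show a + 1 + 1 = a + 2 from by ring]
        exact ih (n - (a + 2)).toNat (by omega) (a + 2) _ rfl (by omega)
      · rw [if_neg h1,
            show PySem.List.pyRange (a + 1) n 1 = [] from PySem.List.pyRange_one_eq_nil (by omega),
            pyRange_two_nil (by omega)]
        rfl
    · rw [PySem.List.pyRange_one_eq_nil (by omega), pyRange_two_nil (by omega)]
      rfl

-- ===== VERDICT (by name: the statement is the Claim_ definition above) =====
theorem generate_light_order_list_spec : Claim_equal_generate_light_order_list := by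
  intro n _
  unfold Spec_generate_light_order_list generate_light_order_list generate_light_order_list_alt
  exact main_lemma n (n - 1).toNat 1 [] rfl (by decide)
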